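-- pv_equiv track=rewrite | github.com/rikamelon/JAmadeus | src/EmbedFactory.py | nhentai_tag_formatter
-- ===== SOURCE A (Python) =====
-- def nhentai_tag_formatter(tags):
--
--     new_tags = []
--
--     for i in tags:
--
--         if i[0] != "lolicon" and i[0] != "shotacon":
--             new_tags.append("[" + i[0] + "](https://nhentai.net" + i[2] + ") (" + str(i[1]) + ")\n")
--         else:
--             new_tags.append(i[0] + " (" + str(i[1]) + ")\n")
--
--     tags = new_tags
--
--     ret, left = list_maker(tags, 1020)
--
--     if left != 0:
--         ret += "+" + str(left) + " more"
--
--     return ret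
--
-- def list_maker(_list, _max):
--
--     j = len(_list)
--
--     ret = ""
--
--     for i in _list:
--
--         if len(i) + len(ret) > _max:
--             return ret, j
--
--         j -= 1
--         ret += str(i)
--
--     return ret, 0
-- ===== SOURCE B (Python) =====
-- def nhentai_tag_formatter(tags):
--     # Build all formatted strings up front, then cut by a prefix-sum table
--     # instead of A's early-exit accumulating scan.
--     parts = [
--         name + " (" + str(count) + ")\n"
--         if name == "lolicon" or name == "shotacon"
--         else "[" + name + "](https://nhentai.net" + url + ") (" + str(count) + ")\n"
--         for (name, count, url) in tags
--     ]
--     prefix = []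
--     total = 0
--     for p in parts:
--         total += len(p)
--         prefix.append(total)
--     cut = sum(1 for s in prefix if s <= 1020)
--     ret = "".join(parts[:cut])
--     left = len(tags) - cut
--     return ret + "+" + str(left) + " more" if left != 0 else ret
-- ===== Notes on version B (the rewrite author's own statement) =====
-- stated objective: alternative
-- what changed: Replaces A's early-exit scan that grows the result string while checking the 1020 cap with a prefix-sum table of part lengths: the cutoff index is the count of prefix sums <= 1020, the result is a join of a slice, and the leftover count is computed arithmetically as len(tags) - cutoff.
import Mathlib
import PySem

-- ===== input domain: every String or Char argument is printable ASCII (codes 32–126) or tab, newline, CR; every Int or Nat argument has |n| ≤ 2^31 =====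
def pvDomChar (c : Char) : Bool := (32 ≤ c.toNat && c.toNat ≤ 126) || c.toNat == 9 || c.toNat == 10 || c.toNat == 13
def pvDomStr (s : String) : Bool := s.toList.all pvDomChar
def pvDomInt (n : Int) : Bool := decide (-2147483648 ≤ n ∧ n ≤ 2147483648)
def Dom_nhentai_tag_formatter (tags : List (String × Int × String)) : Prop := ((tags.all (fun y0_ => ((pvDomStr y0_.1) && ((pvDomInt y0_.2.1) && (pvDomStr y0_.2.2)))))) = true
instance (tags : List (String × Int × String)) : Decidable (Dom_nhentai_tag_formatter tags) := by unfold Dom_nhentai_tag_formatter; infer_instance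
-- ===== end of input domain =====

-- B replaces A's early-exit accumulating scan with a prefix-sum table and a counted cutoff (alternative decomposition, same cost).


-- ===== PORT A =====
-- the 'for i in tags: new_tags.append(…)' loop of A
def pvFmtLoopA : List (String × Int × String) → List String → List String
  | [], acc => acc
  | i :: rest, acc =>
    if i.1 ≠ "lolicon" ∧ i.1 ≠ "shotacon" then
      pvFmtLoopA rest (acc ++ ["[" ++ i.1 ++ "](https://nhentai.net" ++ i.2.2 ++ ") (" ++ PySem.Int.toStr i.2.1 ++ ")\n"])
    else
      pvFmtLoopA rest (acc ++ [i.1 ++ " (" ++ PySem.Int.toStr i.2.1 ++ ")\n"])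

-- list_maker's loop; state (ret, j) as in A
def list_maker : List String → Int → String → Int → String × Int
  | [], _, ret, _ => (ret, 0)
  | i :: rest, mx, ret, j =>
    if PySem.Str.len i + PySem.Str.len ret > mx then (ret, j)
    else list_maker rest mx (ret ++ i) (j - 1)

def nhentai_tag_formatter (tags : List (String × Int × String)) : String :=
  let new_tags := pvFmtLoopA tags []
  let p := list_maker new_tags 1020 "" (new_tags.length : Int)
  if p.2 ≠ 0 then p.1 ++ "+" ++ PySem.Int.toStr p.2 ++ " more" else p.1

-- ===== PORT B =====
def pvFmtB (t : String × Int × String) : String :=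
  if t.1 = "lolicon" ∨ t.1 = "shotacon" then
    t.1 ++ " (" ++ PySem.Int.toStr t.2.1 ++ ")\n"
  else
    "[" ++ t.1 ++ "](https://nhentai.net" ++ t.2.2 ++ ") (" ++ PySem.Int.toStr t.2.1 ++ ")\n"

def nhentai_tag_formatter_alt (tags : List (String × Int × String)) : String :=
  let parts := tags.map pvFmtB
  let pre := (parts.foldl (fun (acc : List Int × Int) p =>
      (acc.1 ++ [acc.2 + PySem.Str.len p], acc.2 + PySem.Str.len p)) ([], 0)).1
  let cut := pre.countP (fun s => s ≤ 1020)
  let ret := PySem.Str.join "" (parts.take cut)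
  let left := (tags.length : Int) - (cut : Int)
  if left ≠ 0 then ret ++ "+" ++ PySem.Int.toStr left ++ " more" else ret

-- ===== PRECONDITION & SPEC =====
def Spec_nhentai_tag_formatter (tags : List (String × Int × String)) (out : String) : Prop := out = nhentai_tag_formatter_alt tags
instance (tags : List (String × Int × String)) (out : String) : Decidable (Spec_nhentai_tag_formatter tags out) := by unfold Spec_nhentai_tag_formatter; infer_instance

-- ===== CLAIM (what is proved, stated in full; the proofs are below) =====
def Claim_equal_nhentai_tag_formatter : Prop := ∀ (tags : List (String × Int × String)), Dom_nhentai_tag_formatter tags → Spec_nhentai_tag_formatter tags (nhentai_tag_formatter tags)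

-- ===== LEMMAS AND PROOFS =====

-- prefix sums of part lengths, started at t
def pvPrefs : List String → Int → List Int
  | [], _ => []
  | p :: rest, t => (t + PySem.Str.len p) :: pvPrefs rest (t + PySem.Str.len p)

def pvCut (parts : List String) (b : Int) : Nat :=
  (pvPrefs parts 0).countP (fun s => s ≤ b)

theorem pvPrefs_shift (parts : List String) (s t : Int) :
    pvPrefs parts (s + t) = (pvPrefs parts s).map (· + t) := by
  induction parts generalizing s with
  | nil => rfl
  | cons p rest ih =>
      simp only [pvPrefs, List.map]
      congr 1
      · ring
      · rw [show s + t + PySem.Str.len p = (s + PySem.Str.len p) + t by ring, ih]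

theorem pvPrefs_ge (parts : List String) (t x : Int) (hx : x ∈ pvPrefs parts t) : t ≤ x := by
  induction parts generalizing t with
  | nil => simp [pvPrefs] at hx
  | cons p rest ih =>
      have hlen : (0:Int) ≤ PySem.Str.len p := by
        rw [PySem.Str.len_eq]; positivity
      simp only [pvPrefs, List.mem_cons] at hx
      rcases hx with h | h
      · omega
      · have := ih (t + PySem.Str.len p) h; omega

theorem pvCut_cons_gt (p : String) (rest : List String) (b : Int)
    (h : b < PySem.Str.len p) : pvCut (p :: rest) b = 0 := by
  unfold pvCut
  rw [List.countP_eq_zero]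
  intro x hx
  simp only [pvPrefs, List.mem_cons, zero_add] at hx
  have hge : PySem.Str.len p ≤ x := by
    rcases hx with rfl | hx
    · exact le_refl _
    · exact pvPrefs_ge rest (PySem.Str.len p) x hx
  simp only [decide_eq_true_eq]
  omega

theorem pvCut_cons_le (p : String) (rest : List String) (b : Int)
    (h : PySem.Str.len p ≤ b) : pvCut (p :: rest) b = pvCut rest (b - PySem.Str.len p) + 1 := by
  unfold pvCut
  simp only [pvPrefs, zero_add, List.countP_cons, decide_eq_true_eq]
  have h1 : pvPrefs rest (PySem.Str.len p) = (pvPrefs rest 0).map (· + PySem.Str.len p) := by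
    have := pvPrefs_shift rest 0 (PySem.Str.len p)
    rwa [zero_add] at this
  rw [h1, List.countP_map]
  have h2 : ∀ x : Int, ((fun s => decide (s ≤ b)) ∘ (· + PySem.Str.len p)) x
      = (fun s => decide (s ≤ b - PySem.Str.len p)) x := by
    intro x; simp only [Function.comp]; rw [decide_eq_decide]; omega
  rw [List.countP_congr (fun x _ => by rw [h2 x])]
  rw [PySem.Str.len_eq] at h
  have h' : ((p.length : Int)) ≤ b := by simpa using h
  simp [h']

theorem pvJoin_nil : PySem.Str.join "" ([] : List String) = "" := by
  simp [PySem.Str.join]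

theorem pvInterNilFlat {α : Type} (xs : List (List α)) :
    (List.intersperse [] xs).flatten = xs.flatten := by
  induction xs with
  | nil => rfl
  | cons a l ih =>
      cases l with
      | nil => rfl
      | cons b m =>
          simp only [List.intersperse, List.flatten_cons] at *
          simp [ih]

theorem pvJoin_cons (a : String) (l : List String) :
    PySem.Str.join "" (a :: l) = a ++ PySem.Str.join "" l := by
  simp [PySem.Str.join, PySem.Chars.join, List.intercalate, pvInterNilFlat]

theorem pvListMaker_eq (parts : List String) (mx : Int) (ret : String) :
    list_maker parts mx ret (parts.length : Int) =
      (ret ++ PySem.Str.join "" (parts.take (pvCut parts (mx - PySem.Str.len ret))),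
       (parts.length : Int) - (pvCut parts (mx - PySem.Str.len ret) : Int)) := by
  induction parts generalizing ret with
  | nil =>
      simp [list_maker, pvCut, pvPrefs, pvJoin_nil]
  | cons i rest ih =>
      by_cases h : PySem.Str.len i + PySem.Str.len ret > mx
      · have hc : pvCut (i :: rest) (mx - PySem.Str.len ret) = 0 :=
          pvCut_cons_gt _ _ _ (by omega)
        simp only [list_maker, if_pos h, hc]
        simp [pvJoin_nil]
      · have hle : PySem.Str.len i ≤ mx - PySem.Str.len ret := by omega
        have hc : pvCut (i :: rest) (mx - PySem.Str.len ret)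
            = pvCut rest (mx - PySem.Str.len ret - PySem.Str.len i) + 1 :=
          pvCut_cons_le _ _ _ hle
        have hj : ((i :: rest).length : Int) - 1 = (rest.length : Int) := by
          simp
        simp only [list_maker, if_neg h, hj]
        rw [ih (ret ++ i)]
        rw [PySem.Str.len_append]
        have harg : mx - (PySem.Str.len ret + PySem.Str.len i)
            = mx - PySem.Str.len ret - PySem.Str.len i := by ring
        rw [harg, hc]
        simp only [Prod.mk.injEq]
        constructor
        · rw [List.take_succ_cons, pvJoin_cons, ← String.append_assoc]
        · simp only [List.length_cons]
          push_cast
          omega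

theorem pvFmtLoopA_eq (tags : List (String × Int × String)) (acc : List String) :
    pvFmtLoopA tags acc = acc ++ tags.map pvFmtB := by
  induction tags generalizing acc with
  | nil => simp [pvFmtLoopA]
  | cons i rest ih =>
      by_cases h : i.1 = "lolicon" ∨ i.1 = "shotacon"
      · have h' : ¬ (i.1 ≠ "lolicon" ∧ i.1 ≠ "shotacon") := by tauto
        simp only [pvFmtLoopA, if_neg h', List.map, pvFmtB, if_pos h, ih]
        simp
      · have h' : i.1 ≠ "lolicon" ∧ i.1 ≠ "shotacon" := by tauto
        simp only [pvFmtLoopA, if_pos h', List.map, pvFmtB, if_neg h, ih]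
        simp

-- B's prefix fold computes pvPrefs
theorem pvFold_prefix (parts : List String) (l : List Int) (t : Int) :
    (parts.foldl (fun (acc : List Int × Int) p =>
      (acc.1 ++ [acc.2 + PySem.Str.len p], acc.2 + PySem.Str.len p)) (l, t)).1
    = l ++ pvPrefs parts t := by
  induction parts generalizing l t with
  | nil => simp [pvPrefs]
  | cons p rest ih =>
      simp only [List.foldl, pvPrefs]
      rw [ih]
      simp

-- ===== VERDICT (by name: the statement is the Claim_ definition above) =====
theorem nhentai_tag_formatter_spec : Claim_equal_nhentai_tag_formatter := by
  intro tags _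
  show nhentai_tag_formatter tags = nhentai_tag_formatter_alt tags
  simp only [nhentai_tag_formatter, nhentai_tag_formatter_alt]
  rw [pvFmtLoopA_eq, List.nil_append]
  rw [pvFold_prefix (tags.map pvFmtB) [] 0, List.nil_append]
  have hcut : (pvPrefs (tags.map pvFmtB) 0).countP (fun s => s ≤ 1020)
      = pvCut (tags.map pvFmtB) (1020 - PySem.Str.len "") := by
    norm_num [pvCut, PySem.Str.len_eq]
  rw [hcut, pvListMaker_eq]
  have hlen : ((tags.map pvFmtB).length : Int) = (tags.length : Int) := by simp
  simp only [hlen]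
  congr 1
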